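-- pv_equiv track=rewrite | github.com/Aufrichtig98/AOC2025 | Day2/day2.py | check_illegal_part_two
-- ===== SOURCE A (Python) =====
-- def built_all_sequenccs(sequence, length):
--     result = list()
--     while sequence:
--         result.append(sequence[:length])
--         sequence = sequence[length:]
--     return result
--
-- def check_illegal_part_two(id):
--     id = str(id)
--     for i in range(1, len(id)//2 + 1):
--         if len(id) % i != 0:
--             continue
--         else:
--             all_sequences = built_all_sequenccs(id, i)
--             if len(set(all_sequences)) == 1:
--                 return True
--
--     return False
-- ===== SOURCE B (Python) =====
-- def check_illegal_part_two(id):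
--     id = str(id)
--     return len(id) > 0 and (id + id).find(id, 1) < len(id)
-- ===== Notes on version B (the rewrite author's own statement) =====
-- stated objective: faster
-- what changed: Replaces the divisor loop that rebuilds and dedups block lists for every candidate length with the doubled-string trick: the string is a repetition of a shorter block iff it occurs in id+id at a position strictly between 0 and len(id).
import Mathlib
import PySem

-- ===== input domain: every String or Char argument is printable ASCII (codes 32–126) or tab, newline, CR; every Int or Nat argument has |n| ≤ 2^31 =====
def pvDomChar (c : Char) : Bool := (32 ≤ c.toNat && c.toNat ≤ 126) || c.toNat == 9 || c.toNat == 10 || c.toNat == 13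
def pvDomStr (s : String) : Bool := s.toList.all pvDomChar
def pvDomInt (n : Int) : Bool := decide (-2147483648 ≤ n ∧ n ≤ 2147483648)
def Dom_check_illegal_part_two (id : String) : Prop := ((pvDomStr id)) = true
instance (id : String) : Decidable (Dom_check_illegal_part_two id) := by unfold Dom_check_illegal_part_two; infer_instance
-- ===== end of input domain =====

-- B replaces A's divisor loop (rebuild + dedup the block list for every candidate length)
-- with the doubled-string occurrence test '(id+id).find(id,1) < len(id)'; equal on every input.

-- ===== PORT A =====
-- Python's built_all_sequenccs diverges for length = 0 (the slice sequence[length:] never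
-- shrinks); A only calls it with length ≥ 1.  The 'length = 0 → []' branch is a totality
-- guard for that unreached case, everything else is the Python while-loop verbatim.
def built_all_sequenccs (sequence : List Char) (length : Nat) : List (List Char) :=
  if length = 0 then []
  else if h : sequence = [] then []
  else sequence.take length :: built_all_sequenccs (sequence.drop length) length
termination_by sequence.length
decreasing_by
  have := List.length_pos_of_ne_nil h
  simp_all
  omega

-- the 'for i in range(1, len(id)//2 + 1)' loop of A, with early return on success
def aLoop (s : List Char) (i : Nat) : Bool :=
  if i ≤ s.length / 2 then
    if s.length % i ≠ 0 then aLoop s (i + 1)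
    else if (PySem.Set.ofList (built_all_sequenccs s i)).length = 1 then true
    else aLoop s (i + 1)
  else false
termination_by s.length / 2 + 1 - i

def check_illegal_part_two (id : String) : Bool := aLoop id.toList 1

-- ===== PORT B =====
def check_illegal_part_two_alt (id : String) : Bool :=
  decide ((0 : Int) < PySem.Str.len id) &&
    decide (PySem.Str.findFrom (id ++ id) id 1 < PySem.Str.len id)

-- ===== PRECONDITION & SPEC =====
def Spec_check_illegal_part_two (id : String) (out : Bool) : Prop := out = check_illegal_part_two_alt id
instance (id : String) (out : Bool) : Decidable (Spec_check_illegal_part_two id out) := by unfold Spec_check_illegal_part_two; infer_instance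

-- ===== CLAIM (what is proved, stated in full; the proofs are below) =====
def Claim_equal_check_illegal_part_two : Prop := ∀ (id : String), Dom_check_illegal_part_two id → Spec_check_illegal_part_two id (check_illegal_part_two id)

-- ===== LEMMAS AND PROOFS =====

-- both sides are equivalent to: some rotation by k, 1 ≤ k < |l|, fixes l
def Periodic (l : List Char) : Prop := ∃ k, 1 ≤ k ∧ k < l.length ∧ l.rotate k = l

-- unfolding of the chunk builder for positive length
lemma built_pos {d : Nat} (hd : 0 < d) (l : List Char) :
    built_all_sequenccs l d =
      if l = [] then [] else l.take d :: built_all_sequenccs (l.drop d) d := by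
  rw [built_all_sequenccs, if_neg (by omega)]
  split_ifs with h <;> simp

-- set(xs) has one element iff xs is nonempty and constant
lemma setlen_one (xs : List (List Char)) :
    (PySem.Set.ofList xs).length = 1 ↔ ∃ a, xs ≠ [] ∧ ∀ x ∈ xs, x = a := by
  rw [List.length_eq_one_iff]
  constructor
  · rintro ⟨a, ha⟩
    refine ⟨a, ?_, ?_⟩
    · rintro rfl; simp [PySem.Set.ofList] at ha
    · intro x hx
      have hx' : x ∈ PySem.Set.ofList xs := by rw [PySem.Set.mem_ofList]; exact hx
      rw [ha] at hx'; simpa using hx'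
  · rintro ⟨a, hne, hall⟩
    refine ⟨a, ?_⟩
    have hnd : (PySem.Set.ofList xs).Nodup := PySem.Set.nodup_ofList xs
    have hmem : ∀ x, x ∈ PySem.Set.ofList xs ↔ x = a := by
      intro x
      rw [PySem.Set.mem_ofList]
      constructor
      · exact hall x
      · rintro rfl
        obtain ⟨y, hy⟩ := List.exists_mem_of_ne_nil xs hne
        have := hall y hy; subst this; exact hy
    match hof : PySem.Set.ofList xs with
    | [] =>
      exfalso
      have := (hmem a).mpr rfl
      rw [hof] at this; simp at this
    | b :: t =>
      rw [hof] at hmem hnd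
      have hb : b = a := (hmem b).mp (by simp)
      have ht : t = [] := by
        match t with
        | [] => rfl
        | c :: t' =>
          exfalso
          have hc : c = a := (hmem c).mp (by simp)
          subst hb; subst hc
          simp at hnd
      rw [hb, ht]

-- rotation by d fixing l makes every chunk equal to the first
lemma chunks_const_of_rotate {d : Nat} (hd : 0 < d) :
    ∀ m (l : List Char), l.length = m * d → l.drop d ++ l.take d = l →
      ∀ c ∈ built_all_sequenccs l d, c = l.take d := by
  intro m
  induction m with
  | zero =>
    intro l hlen _ c hc
    have : l = [] := List.eq_nil_of_length_eq_zero (by omega)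
    subst this
    rw [built_pos hd, if_pos rfl] at hc
    simp at hc
  | succ m ih =>
    intro l hlen hrot c hc
    have hlne : l ≠ [] := by
      intro h; subst h; simp at hlen; omega
    rw [built_pos hd, if_neg hlne] at hc
    rcases List.mem_cons.mp hc with rfl | hc'
    · rfl
    · have hdle : d ≤ l.length := by
        have : (m + 1) * d = m * d + d := by ring
        omega
      have hclen : (l.take d).length = d := by
        simp [min_eq_left hdle]
      have hrlen : (l.drop d).length = m * d := by
        have : (m + 1) * d = m * d + d := by ring
        simp only [List.length_drop]; omega
      by_cases hm : m = 0
      · subst hm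
        have : l.drop d = [] := List.eq_nil_of_length_eq_zero (by omega)
        rw [built_pos hd, if_pos this] at hc'
        simp at hc'
      · have hdr : d ≤ (l.drop d).length := by
          have : 1 * d ≤ m * d := Nat.mul_le_mul_right d (by omega)
          omega
        have hsplit : l.take d ++ l.drop d = l := List.take_append_drop d l
        have hcomm : l.drop d ++ l.take d = l.take d ++ l.drop d := by
          rw [hrot, hsplit]
        have htake : (l.drop d).take d = l.take d := by
          have h1 := congrArg (List.take d) hcomm
          rwa [List.take_append_of_le_length hdr, List.take_left' hclen] at h1
        have hdrop : (l.drop d).drop d ++ (l.drop d).take d = l.drop d := by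
          have h1 := congrArg (List.drop d) hcomm
          rw [List.drop_append_of_le_length hdr, List.drop_left' hclen] at h1
          rw [htake]; exact h1
        have := ih (l.drop d) hrlen hdrop c hc'
        rw [this, htake]

-- constant chunks mean l is m copies of its first block
lemma rep_of_chunks {d : Nat} (hd : 0 < d) :
    ∀ m (l : List Char), l.length = m * d →
      (∀ c ∈ built_all_sequenccs l d, c = l.take d) →
      l = (List.replicate m (l.take d)).flatten := by
  intro m
  induction m with
  | zero =>
    intro l hlen _
    have : l = [] := List.eq_nil_of_length_eq_zero (by omega)
    simp [this]
  | succ m ih =>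
    intro l hlen hall
    have hlne : l ≠ [] := by
      intro h; subst h; simp at hlen; omega
    have hdle : d ≤ l.length := by
      have : (m + 1) * d = m * d + d := by ring
      omega
    have hrlen : (l.drop d).length = m * d := by
      have : (m + 1) * d = m * d + d := by ring
      simp only [List.length_drop]; omega
    have hall' : ∀ c ∈ built_all_sequenccs (l.drop d) d, c = l.take d := by
      intro c hc
      apply hall
      rw [built_pos hd, if_neg hlne]
      exact List.mem_cons_of_mem _ hc
    have hrep : l.drop d = (List.replicate m ((l.drop d).take d)).flatten := by
      apply ih (l.drop d) hrlen
      intro c hc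
      by_cases hm : m = 0
      · subst hm
        have : l.drop d = [] := List.eq_nil_of_length_eq_zero (by omega)
        rw [built_pos hd, if_pos this] at hc
        simp at hc
      · have hrne : l.drop d ≠ [] := by
          intro h
          have : 1 * d ≤ m * d := Nat.mul_le_mul_right d (by omega)
          rw [h] at hrlen; simp at hrlen; omega
        have hhead : (l.drop d).take d ∈ built_all_sequenccs (l.drop d) d := by
          rw [built_pos hd, if_neg hrne]; simp
        rw [hall' _ hc, hall' _ hhead]
    have hrep' : l.drop d = (List.replicate m (l.take d)).flatten := by
      rcases Nat.eq_zero_or_pos m with rfl | hmpos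
      · simpa using hrep
      · have hrne : l.drop d ≠ [] := by
          intro h
          have : 1 * d ≤ m * d := Nat.mul_le_mul_right d (by omega)
          rw [h] at hrlen; simp at hrlen; omega
        have hhead : (l.drop d).take d ∈ built_all_sequenccs (l.drop d) d := by
          rw [built_pos hd, if_neg hrne]; simp
        rw [hrep, hall' _ hhead]
    calc l = l.take d ++ l.drop d := (List.take_append_drop d l).symm
      _ = l.take d ++ (List.replicate m (l.take d)).flatten := by rw [hrep']
      _ = (List.replicate (m + 1) (l.take d)).flatten := by
            rw [List.replicate_succ, List.flatten_cons]

-- conversely, constant chunks give the rotation identity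
lemma rotate_of_chunks_const {d : Nat} (hd : 0 < d) :
    ∀ m (l : List Char), 1 ≤ m → l.length = m * d →
      (∀ c ∈ built_all_sequenccs l d, c = l.take d) →
      l.drop d ++ l.take d = l := by
  intro m l hm hlen hall
  have hrep := rep_of_chunks hd m l hlen hall
  have hdle : d ≤ l.length := by
    have : 1 * d ≤ m * d := Nat.mul_le_mul_right d hm
    omega
  have hclen : (l.take d).length = d := by simp [min_eq_left hdle]
  obtain ⟨m', rfl⟩ : ∃ m', m = m' + 1 := ⟨m - 1, by omega⟩
  have hsucc : (List.replicate (m' + 1) (l.take d)).flatten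
      = l.take d ++ (List.replicate m' (l.take d)).flatten := by
    rw [List.replicate_succ, List.flatten_cons]
  have hsucc' : (List.replicate (m' + 1) (l.take d)).flatten
      = (List.replicate m' (l.take d)).flatten ++ l.take d := by
    rw [List.replicate_succ', List.flatten_append]; simp
  have hdropd : l.drop d = (List.replicate m' (l.take d)).flatten := by
    conv_lhs => rw [hrep, hsucc]
    exact List.drop_left' hclen
  rw [hdropd, ← hsucc', ← hrep]

-- rotation subgroup: a fixing rotation yields a fixing rotation by gcd
lemma rotate_gcd {l : List Char} {k : Nat} (hk : 1 ≤ k) (hkn : k < l.length)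
    (h : l.rotate k = l) : l.rotate (Nat.gcd k l.length) = l := by
  set n := l.length with hn
  have hnpos : 0 < n := by omega
  have step : ∀ m, l.rotate (m * k) = l := by
    intro m
    induction m with
    | zero => simp
    | succ m ih =>
      have : (m + 1) * k = m * k + k := by ring
      rw [this, ← List.rotate_rotate, ih, h]
  have bez : (Nat.gcd k n : Int) = k * Nat.gcdA k n + n * Nat.gcdB k n :=
    Nat.gcd_eq_gcd_ab k n
  set a := Nat.gcdA k n with ha
  set m := (a % (n : Int)).toNat with hm
  have hnne : (n : Int) ≠ 0 := by exact_mod_cast hnpos.ne'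
  have hmcast : (m : Int) = a % (n : Int) :=
    Int.toNat_of_nonneg (Int.emod_nonneg a hnne)
  have key : ((m * k : Nat) : Int) % (n : Int) = ((Nat.gcd k n : Nat) : Int) % (n : Int) := by
    push_cast
    rw [hmcast]
    calc (a % (n : Int)) * k % n = a * k % n := by
          rw [Int.mul_emod, Int.emod_emod_of_dvd a dvd_rfl, ← Int.mul_emod]
      _ = ((Nat.gcd k n : Nat) : Int) % n := by
          rw [bez, mul_comm (k : Int) a, Int.add_mul_emod_self_left]
  have keyNat : (m * k) % n = Nat.gcd k n % n := by exact_mod_cast key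
  have hglt : Nat.gcd k n < n := lt_of_le_of_lt (Nat.gcd_le_left n hk) hkn
  calc l.rotate (Nat.gcd k n) = l.rotate (Nat.gcd k n % n) := by
        rw [Nat.mod_eq_of_lt hglt]
    _ = l.rotate ((m * k) % n) := by rw [keyNat]
    _ = l.rotate (m * k) := by rw [hn]; exact List.rotate_mod l (m * k)
    _ = l := step m

-- characterisation of A's loop: true iff some divisor i ≥ j up to n//2 has equal blocks
lemma aLoop_iff_aux (s : List Char) :
    ∀ t j, s.length / 2 + 1 - j ≤ t →
      (aLoop s j = true ↔ ∃ i, j ≤ i ∧ i ≤ s.length / 2 ∧ s.length % i = 0 ∧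
        (PySem.Set.ofList (built_all_sequenccs s i)).length = 1) := by
  intro t
  induction t with
  | zero =>
    intro j hj
    rw [aLoop, if_neg (by omega)]
    constructor
    · intro h; simp at h
    · rintro ⟨i, h1, h2, _⟩; omega
  | succ t ih =>
    intro j hj
    rw [aLoop]
    split_ifs with h1 h2 h3
    · -- j ≤ n/2, n % j ≠ 0: skip to j+1
      rw [ih (j + 1) (by omega)]
      constructor
      · rintro ⟨i, hi1, hi2, hi3, hi4⟩; exact ⟨i, by omega, hi2, hi3, hi4⟩
      · rintro ⟨i, hi1, hi2, hi3, hi4⟩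
        refine ⟨i, ?_, hi2, hi3, hi4⟩
        rcases Nat.eq_or_lt_of_le hi1 with rfl | hlt
        · exact absurd hi3 h2
        · omega
    · -- success at j
      constructor
      · intro _; exact ⟨j, le_refl j, h1, by omega, h3⟩
      · intro _; rfl
    · -- n % j = 0 but blocks unequal: skip to j+1
      rw [ih (j + 1) (by omega)]
      constructor
      · rintro ⟨i, hi1, hi2, hi3, hi4⟩; exact ⟨i, by omega, hi2, hi3, hi4⟩
      · rintro ⟨i, hi1, hi2, hi3, hi4⟩
        refine ⟨i, ?_, hi2, hi3, hi4⟩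
        rcases Nat.eq_or_lt_of_le hi1 with rfl | hlt
        · exact absurd hi4 h3
        · omega
    · -- j > n/2: loop over
      constructor
      · intro h; simp at h
      · rintro ⟨i, hi1, hi2, _⟩; omega

lemma aLoop_iff (s : List Char) (j : Nat) :
    aLoop s j = true ↔ ∃ i, j ≤ i ∧ i ≤ s.length / 2 ∧ s.length % i = 0 ∧
      (PySem.Set.ofList (built_all_sequenccs s i)).length = 1 :=
  aLoop_iff_aux s (s.length / 2 + 1 - j) j (le_refl _)

lemma A_iff (id : String) : check_illegal_part_two id = true ↔ Periodic id.toList := by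
  unfold check_illegal_part_two Periodic
  rw [aLoop_iff]
  set l := id.toList with hl
  set n := l.length with hn
  constructor
  · rintro ⟨i, hi1, hi2, hmod, hset⟩
    have hipos : 0 < i := hi1
    have hn2 : 2 ≤ n := by omega
    have hin : i < n := by omega
    have hdvd : i ∣ n := Nat.dvd_of_mod_eq_zero hmod
    have hmn : n = (n / i) * i := (Nat.div_mul_cancel hdvd).symm
    have hm1 : 1 ≤ n / i := (Nat.one_le_div_iff hipos).mpr (by omega)
    obtain ⟨a, hne, hall⟩ := (setlen_one _).mp hset
    have hlne : l ≠ [] := by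
      intro h; rw [h] at hn; simp at hn; omega
    have hhead : l.take i ∈ built_all_sequenccs l i := by
      rw [built_pos hipos, if_neg hlne]; simp
    have hall' : ∀ c ∈ built_all_sequenccs l i, c = l.take i := by
      intro c hc; rw [hall c hc, ← hall _ hhead]
    have hrot := rotate_of_chunks_const hipos (n / i) l hm1 hmn hall'
    refine ⟨i, hi1, hin, ?_⟩
    rw [List.rotate_eq_drop_append_take (by omega : i ≤ l.length)]
    exact hrot
  · rintro ⟨k, hk1, hkn, hrot⟩
    have hn2 : 2 ≤ n := by omega
    set g := Nat.gcd k n with hg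
    have hgrot : l.rotate g = l := rotate_gcd hk1 hkn hrot
    have hgpos : 0 < g := Nat.gcd_pos_of_pos_left n hk1
    have hgdvd : g ∣ n := Nat.gcd_dvd_right k n
    have hglt : g < n := lt_of_le_of_lt (Nat.gcd_le_left n hk1) hkn
    obtain ⟨m, hm⟩ := hgdvd
    have hm2 : 2 ≤ m := by
      by_contra hlt
      have : m = 0 ∨ m = 1 := by omega
      rcases this with rfl | rfl
      · simp at hm; omega
      · simp at hm; omega
    have hg2 : g ≤ n / 2 := by
      have : g * 2 ≤ g * m := Nat.mul_le_mul_left g hm2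
      omega
    have hmod : n % g = 0 := by rw [hm]; exact Nat.mul_mod_right g m
    have hdrop : l.drop g ++ l.take g = l := by
      rw [← List.rotate_eq_drop_append_take (by omega : g ≤ l.length)]
      exact hgrot
    have hlen : l.length = (n / g) * g := (Nat.div_mul_cancel ⟨m, hm⟩).symm
    have hall := chunks_const_of_rotate hgpos (n / g) l hlen hdrop
    have hlne : l ≠ [] := by
      intro h; rw [h] at hn; simp at hn; omega
    have hchne : built_all_sequenccs l g ≠ [] := by
      rw [built_pos hgpos, if_neg hlne]; simp
    refine ⟨g, hgpos, hg2, hmod, (setlen_one _).mpr ⟨l.take g, hchne, hall⟩⟩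

-- an occurrence of l in l++l at offset k ≤ n, given the rotation identity
lemma occurrence_at {l : List Char} {k : Nat} (hk : k ≤ l.length)
    (hrot : l.rotate k = l) : l <+: (l ++ l).drop k := by
  have hdrop : (l ++ l).drop k = l.drop k ++ l := List.drop_append_of_le_length hk
  have hrot' : l.drop k ++ l.take k = l := by
    rw [← List.rotate_eq_drop_append_take hk]; exact hrot
  have : l.drop k ++ l = l ++ l.drop k := by
    calc l.drop k ++ l = l.drop k ++ (l.take k ++ l.drop k) := by
          rw [List.take_append_drop]
      _ = (l.drop k ++ l.take k) ++ l.drop k := by rw [List.append_assoc]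
      _ = l ++ l.drop k := by rw [hrot']
  rw [hdrop, this]
  exact List.prefix_append l (l.drop k)

lemma B_iff (id : String) : check_illegal_part_two_alt id = true ↔ Periodic id.toList := by
  unfold check_illegal_part_two_alt Periodic
  rw [Bool.and_eq_true, decide_eq_true_iff, decide_eq_true_iff,
    PySem.Str.len_eq, PySem.Str.findFrom_eq]
  have happ : (id ++ id).toList = id.toList ++ id.toList := by simp
  rw [happ]
  set l := id.toList with hl
  set n := l.length with hn
  rcases Nat.eq_zero_or_pos n with h0 | hpos
  · constructor
    · rintro ⟨h, _⟩; rw [h0] at h; simp at h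
    · rintro ⟨k, hk1, hkn, _⟩; omega
  · have h1le : 1 ≤ (l ++ l).length := by simp; omega
    have hcast : ((1 : Nat) : Int) = 1 := by norm_num
    have hiff : PySem.Chars.findFrom (l ++ l) l 1 = -1 ↔ ¬ l <:+: (l ++ l).drop 1 := by
      rw [← hcast]
      exact PySem.Chars.findFrom_natCast_eq_neg_one_iff (l ++ l) l 1 h1le
    have hoccn : l <+: (l ++ l).drop n := by
      apply occurrence_at (le_refl _)
      exact List.rotate_length l
    have hinf1 : ∀ k, 1 ≤ k → l <+: (l ++ l).drop k → l <:+: (l ++ l).drop 1 := by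
      intro k hk hocc
      have hsub : (l ++ l).drop k = ((l ++ l).drop 1).drop (k - 1) := by
        rw [List.drop_drop]; congr 1; omega
      rw [hsub] at hocc
      exact hocc.isInfix.trans (List.drop_suffix _ _).isInfix
    have hne : PySem.Chars.findFrom (l ++ l) l 1 ≠ -1 := by
      rw [ne_eq, hiff, not_not]
      exact hinf1 n (by omega) hoccn
    have hne' : PySem.Chars.findFrom (l ++ l) l ((1 : Nat) : Int) ≠ -1 := by
      rw [hcast]; exact hne
    obtain ⟨h1f, hpref, hmin⟩ :=
      PySem.Chars.findFrom_natCast_spec (l ++ l) l 1 h1le hne'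
    rw [hcast] at h1f hpref hmin
    set f := PySem.Chars.findFrom (l ++ l) l 1 with hf
    constructor
    · rintro ⟨_, hlt⟩
      have h0f : (0 : Int) ≤ f := by omega
      have hk1 : 1 ≤ f.toNat := by omega
      have hkn : f.toNat < n := by omega
      refine ⟨f.toNat, hk1, hkn, ?_⟩
      have hkle : f.toNat ≤ l.length := by omega
      rw [List.drop_append_of_le_length hkle] at hpref
      have heq : l = (l.drop f.toNat ++ l).take l.length :=
        List.prefix_iff_eq_take.mp hpref
      rw [List.take_append] at heq
      rw [List.take_of_length_le
        (by simp : (l.drop f.toNat).length ≤ l.length)] at heq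
      have hlen' : l.length - (l.drop f.toNat).length = f.toNat := by
        simp; omega
      rw [hlen'] at heq
      rw [List.rotate_eq_drop_append_take (by omega : f.toNat ≤ l.length)]
      exact heq.symm
    · rintro ⟨k, hk1, hkn, hrot⟩
      have hocc : l <+: (l ++ l).drop k := occurrence_at (by omega) hrot
      refine ⟨by omega, ?_⟩
      have hfk : f.toNat ≤ k := by
        by_contra hgt
        exact hmin k hk1 (by omega) hocc
      omega

-- ===== VERDICT (by name: the statement is the Claim_ definition above) =====
theorem check_illegal_part_two_spec : Claim_equal_check_illegal_part_two := by
  intro id _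
  unfold Spec_check_illegal_part_two
  have hA := A_iff id
  have hB := B_iff id
  cases hA' : check_illegal_part_two id <;> cases hB' : check_illegal_part_two_alt id <;>
    simp_all
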